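-- pv_equiv track=rewrite | github.com/Raghuram224/ZEST | Hacktober_day28.py | consecutive_num
-- ===== SOURCE A (Python) =====
-- def consecutive_num(l,i,count):
--     if i== len(l)-1:
--         if count>0:
--             return True
--         else:
--             return False
--     if i<len(l)-1:
--         a=l[i]
--         b=l[i+1]
--         if a+b==0:
--             count+=1
--         i+=1
--     return consecutive_num(l,i,count)
-- ===== SOURCE B (Python) =====
-- def consecutive_num(l, i, count):
--     # Iterative single loop instead of tail recursion; count > 0 checked once at the end.
--     n = len(l)
--     while i != n - 1:
--         count += l[i] + l[i + 1] == 0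
--         i += 1
--     return count > 0
-- ===== Notes on version B (the rewrite author's own statement) =====
-- stated objective: simpler
-- what changed: Replaces the three-branch tail recursion with a single iterative while-loop that accumulates the zero-pair count via a bool-to-int add and performs the count > 0 test once at the end.
import Mathlib
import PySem

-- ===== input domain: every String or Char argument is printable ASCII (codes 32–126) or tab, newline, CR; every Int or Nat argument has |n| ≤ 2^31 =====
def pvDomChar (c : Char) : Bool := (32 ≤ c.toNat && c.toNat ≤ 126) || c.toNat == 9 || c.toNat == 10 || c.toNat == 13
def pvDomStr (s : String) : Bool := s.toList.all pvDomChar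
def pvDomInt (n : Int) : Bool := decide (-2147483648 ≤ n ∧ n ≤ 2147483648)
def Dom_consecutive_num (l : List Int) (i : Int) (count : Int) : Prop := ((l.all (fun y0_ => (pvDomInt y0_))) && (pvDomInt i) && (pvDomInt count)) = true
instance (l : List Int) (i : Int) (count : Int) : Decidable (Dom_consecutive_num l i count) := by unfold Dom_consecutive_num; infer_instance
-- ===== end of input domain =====

-- B replaces A's three-branch tail recursion with an iterative while-loop accumulating the zero-pair count, compared to 0 once at the end (objective: simpler).


-- ===== PORT A =====
-- Literal port of A's tail recursion. In the branch i ≥ len(l)-1 with i ≠ len(l)-1 the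
-- Python recurses forever (RecursionError); that region is outside Pre_ and the port returns false there.
def consecutive_num (l : List Int) (i : Int) (count : Int) : Bool :=
  if i = (l.length : Int) - 1 then
    decide (count > 0)
  else if _h : i < (l.length : Int) - 1 then
    let a := (PySem.List.pyGet? l i).getD 0
    let b := (PySem.List.pyGet? l (i + 1)).getD 0
    consecutive_num l (i + 1) (if a + b = 0 then count + 1 else count)
  else
    false
termination_by ((l.length : Int) - 1 - i).toNat
decreasing_by omega

-- ===== PORT B =====
-- Port of Source B's while-loop as structural recursion on the same (i, count) state; the loop body
-- reads l[i] and l[i+1], which raise IndexError out of range (outside Pre_): the port returns false there.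
def consecutive_num_alt (l : List Int) (i : Int) (count : Int) : Bool :=
  if i = (l.length : Int) - 1 then
    decide (count > 0)
  else if h1 : PySem.Raise.InRange l.length i then
    if _h2 : PySem.Raise.InRange l.length (i + 1) then
      consecutive_num_alt l (i + 1)
        (count + if PySem.List.pyGetD l i 0 + PySem.List.pyGetD l (i + 1) 0 = 0 then 1 else 0)
    else
      false  -- IndexError on l[i+1]
  else
    false  -- IndexError on l[i]
termination_by ((l.length : Int) - i).toNat
decreasing_by
  unfold PySem.Raise.InRange at h1
  omega

-- ===== PRECONDITION & SPEC =====
-- Pre_ excludes exactly the inputs where the Python A raises: i ≥ len(l) (infinite recursion,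
-- RecursionError) and i < -len(l) (IndexError); on the empty list only i = -1 returns.
def Pre_consecutive_num (l : List Int) (i : Int) (count : Int) : Prop :=
  (l = [] ∧ i = -1) ∨ (l ≠ [] ∧ -(l.length : Int) ≤ i ∧ i ≤ (l.length : Int) - 1)
instance (l : List Int) (i : Int) (count : Int) : Decidable (Pre_consecutive_num l i count) := by
  unfold Pre_consecutive_num; infer_instance
def pvWitness_consecutive_num : List Int × Int × Int := ([1, -1], 0, 0)

def Spec_consecutive_num (l : List Int) (i : Int) (count : Int) (out : Bool) : Prop := out = consecutive_num_alt l i count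
instance (l : List Int) (i : Int) (count : Int) (out : Bool) : Decidable (Spec_consecutive_num l i count out) := by unfold Spec_consecutive_num; infer_instance

-- ===== CLAIM (what is proved, stated in full; the proofs are below) =====
def Claim_equal_consecutive_num : Prop := ∀ (l : List Int) (i : Int) (count : Int), Dom_consecutive_num l i count → Pre_consecutive_num l i count → Spec_consecutive_num l i count (consecutive_num l i count)

-- ===== LEMMAS AND PROOFS =====

lemma pvKey (l : List Int) : ∀ (n : Nat) (i count : Int),
    -(l.length : Int) ≤ i → i ≤ (l.length : Int) - 1 → (((l.length : Int) - 1 - i)).toNat = n →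
    consecutive_num l i count = consecutive_num_alt l i count := by
  intro n
  induction n with
  | zero =>
    intro i count _hlo hle hn
    have hi : i = (l.length : Int) - 1 := by omega
    rw [consecutive_num, consecutive_num_alt, if_pos hi, if_pos hi]
  | succ m ih =>
    intro i count hlo hle hn
    have hlt : i < (l.length : Int) - 1 := by omega
    have hin1 : PySem.Raise.InRange l.length i := by
      unfold PySem.Raise.InRange; omega
    have hin2 : PySem.Raise.InRange l.length (i + 1) := by
      unfold PySem.Raise.InRange; omega
    rw [consecutive_num, consecutive_num_alt,
        if_neg (by omega), if_neg (by omega), dif_pos hlt, dif_pos hin1, dif_pos hin2]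
    have harg :
        (if (PySem.List.pyGet? l i).getD 0 + (PySem.List.pyGet? l (i + 1)).getD 0 = 0
          then count + 1 else count) =
        count + (if PySem.List.pyGetD l i 0 + PySem.List.pyGetD l (i + 1) 0 = 0
          then (1 : Int) else 0) := by
      simp only [PySem.List.pyGetD]
      split_ifs <;> omega
    show consecutive_num l (i + 1)
        (if (PySem.List.pyGet? l i).getD 0 + (PySem.List.pyGet? l (i + 1)).getD 0 = 0
          then count + 1 else count) = _
    rw [harg]
    exact ih (i + 1) _ (by omega) (by omega) (by omega)

-- ===== VERDICT (by name: the statement is the Claim_ definition above) =====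
theorem consecutive_num_spec : Claim_equal_consecutive_num := by
  intro l i count _hd hpre
  unfold Spec_consecutive_num
  rcases hpre with ⟨hl, hi⟩ | ⟨_, hlo, hle⟩
  · subst hl; subst hi
    rw [consecutive_num, consecutive_num_alt]
    norm_num
  · exact pvKey l (((l.length : Int) - 1 - i)).toNat i count hlo hle rfl
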